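-- pv_equiv track=rewrite | github.com/frontloss/GPU_Validation_Infrastructure | DisplayAutomation2.0/Tests/PowerCons/Functional/BLC/blc.py | create_nit_ranges
-- ===== SOURCE A (Python) =====
-- def create_nit_ranges(nit_ranges):
--     no_of_ranges = 0
--     nit_range = []
--     # checking the nit ranges in order of 3(min, max, step size)
--     if len(nit_ranges) % 3 != 0:
--         assert False, "NO Nits ranges are not in the range of three(min, max, Step size) (command-line issue)"
--     while no_of_ranges < len(nit_ranges):
--         nit_range.append([nit_ranges[no_of_ranges],
--                           nit_ranges[no_of_ranges + 1],
--                           nit_ranges[no_of_ranges + 2]])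
--         no_of_ranges += 3
--     nit_ranges = nit_range  # [30_590_1_600_700_10]->[['30', '590', '1'],['600','700','10']]
--     return nit_ranges
-- ===== SOURCE B (Python) =====
-- def create_nit_ranges(nit_ranges):
--     # checking the nit ranges in order of 3(min, max, step size)
--     assert len(nit_ranges) % 3 == 0, "NO Nits ranges are not in the range of three(min, max, Step size) (command-line issue)"
--     it = iter(nit_ranges)
--     return [list(t) for t in zip(it, it, it)]
-- ===== Notes on version B (the rewrite author's own statement) =====
-- stated objective: idiomatic
-- what changed: Replaces the index-walking while-loop with the shared-iterator zip(it,it,it) grouping idiom (in Lean: structural recursion pattern-matching three elements at a time instead of an index counter into the list).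
import Mathlib
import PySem

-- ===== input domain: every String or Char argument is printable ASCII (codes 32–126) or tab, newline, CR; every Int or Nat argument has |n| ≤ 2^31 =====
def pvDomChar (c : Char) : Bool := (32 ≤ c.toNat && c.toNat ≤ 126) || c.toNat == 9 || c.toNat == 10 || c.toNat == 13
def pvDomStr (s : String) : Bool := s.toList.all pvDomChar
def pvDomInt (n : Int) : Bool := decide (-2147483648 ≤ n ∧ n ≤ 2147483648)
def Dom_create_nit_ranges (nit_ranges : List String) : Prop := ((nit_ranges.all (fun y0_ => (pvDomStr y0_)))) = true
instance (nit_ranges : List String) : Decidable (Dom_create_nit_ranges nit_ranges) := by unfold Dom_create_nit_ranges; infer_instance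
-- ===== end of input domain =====

-- B groups the list three at a time via the shared-iterator zip idiom (in Lean: structural
-- recursion matching three elements) instead of A's index-walking while-loop; return value only.

-- ===== PORT A =====
-- the while-loop: index no_of_ranges steps by 3, appending the triple at that index
def create_nit_ranges_go (xs : List String) (i : Nat) (acc : List (List String)) :
    List (List String) :=
  if i < xs.length then
    create_nit_ranges_go xs (i + 3)
      (acc ++ [[((PySem.List.pyGet? xs (i : Int)).getD ""),
                ((PySem.List.pyGet? xs ((i : Int) + 1)).getD ""),
                ((PySem.List.pyGet? xs ((i : Int) + 2)).getD "")]])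
  else acc
termination_by xs.length - i

def create_nit_ranges (nit_ranges : List String) : List (List String) :=
  -- assert False branch (AssertionError) is excluded by Pre_; the port returns [] there
  if nit_ranges.length % 3 ≠ 0 then []
  else create_nit_ranges_go nit_ranges 0 []

-- ===== PORT B =====
-- zip(it, it, it): consume three elements per step
def chunk3 : List String → List (List String)
  | a :: b :: c :: rest => [a, b, c] :: chunk3 rest
  | _ => []

def create_nit_ranges_alt (nit_ranges : List String) : List (List String) :=
  -- the assert raises (AssertionError) outside Pre_; the port returns [] there
  if nit_ranges.length % 3 ≠ 0 then []
  else chunk3 nit_ranges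

-- ===== PRECONDITION & SPEC =====
-- Pre_ excludes exactly the inputs on which A's assert raises AssertionError (length not a multiple of 3)
def Pre_create_nit_ranges (nit_ranges : List String) : Prop := nit_ranges.length % 3 = 0
instance (nit_ranges : List String) : Decidable (Pre_create_nit_ranges nit_ranges) := by
  unfold Pre_create_nit_ranges; infer_instance

def pvWitness_create_nit_ranges : List String := ["30", "590", "1", "600", "700", "10"]

def Spec_create_nit_ranges (nit_ranges : List String) (out : List (List String)) : Prop :=
  out = create_nit_ranges_alt nit_ranges
instance (nit_ranges : List String) (out : List (List String)) :
    Decidable (Spec_create_nit_ranges nit_ranges out) := by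
  unfold Spec_create_nit_ranges; infer_instance

-- ===== CLAIM =====
def Claim_equal_create_nit_ranges : Prop :=
  ∀ (nit_ranges : List String), Dom_create_nit_ranges nit_ranges →
    Pre_create_nit_ranges nit_ranges →
    Spec_create_nit_ranges nit_ranges (create_nit_ranges nit_ranges)

-- ===== LEMMAS AND PROOFS =====
theorem create_nit_ranges_go_eq (xs : List String) (i : Nat) (acc : List (List String))
    (h : (xs.length - i) % 3 = 0) :
    create_nit_ranges_go xs i acc = acc ++ chunk3 (xs.drop i) := by
  rw [create_nit_ranges_go]
  split
  · rename_i hi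
    have h3 : i + 3 ≤ xs.length := by omega
    have d0 : xs.drop i = xs[i] :: xs.drop (i + 1) :=
      List.drop_eq_getElem_cons (by omega)
    have d1 : xs.drop (i + 1) = xs[i + 1] :: xs.drop (i + 2) :=
      List.drop_eq_getElem_cons (by omega)
    have d2 : xs.drop (i + 2) = xs[i + 2] :: xs.drop (i + 3) :=
      List.drop_eq_getElem_cons (by omega)
    have g0 : PySem.List.pyGet? xs (i : Int) = some xs[i] := by
      simp [PySem.List.pyGet?_natCast, List.getElem?_eq_getElem (by omega : i < xs.length)]
    have g1 : PySem.List.pyGet? xs ((i : Int) + 1) = some xs[i + 1] := by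
      have : ((i : Int) + 1) = ((i + 1 : Nat) : Int) := by push_cast; ring
      rw [this, PySem.List.pyGet?_natCast, List.getElem?_eq_getElem (by omega : i + 1 < xs.length)]
    have g2 : PySem.List.pyGet? xs ((i : Int) + 2) = some xs[i + 2] := by
      have : ((i : Int) + 2) = ((i + 2 : Nat) : Int) := by push_cast; ring
      rw [this, PySem.List.pyGet?_natCast, List.getElem?_eq_getElem (by omega : i + 2 < xs.length)]
      rfl
    rw [create_nit_ranges_go_eq xs (i + 3) _ (by omega)]
    rw [d0, d1, d2, g0, g1, g2, chunk3]
    simp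
  · rename_i hi
    have hd : xs.drop i = [] := List.drop_eq_nil_of_le (by omega)
    simp [hd, chunk3]
termination_by xs.length - i

-- ===== VERDICT =====
theorem create_nit_ranges_spec : Claim_equal_create_nit_ranges := by
  intro xs _ hpre
  unfold Spec_create_nit_ranges create_nit_ranges create_nit_ranges_alt
  have h : xs.length % 3 = 0 := hpre
  simp only [h]
  rw [create_nit_ranges_go_eq xs 0 [] (by omega)]
  simp
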